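-- pv_equiv track=rewrite | github.com/Jbase16/sentinel | core/toolkit/installer.py | _parse
-- ===== SOURCE A (Python) =====
-- from typing import Dict, List, Optional, Tuple, NamedTuple
--
-- class CommandSegment(NamedTuple):
--     """Represents a single command within a chain."""
--     cmd: List[str]
--     operator_before: Optional[str]  # "&&", "||", or None
--
-- def _parse(tokens: List[str]) -> List[CommandSegment]:
--     """Parse raw token list into CommandSegments."""
--     segments = []
--     current_cmd = []
--     last_op = None
--
--     for token in tokens:
--         if token in ("&&", "||"):
--             if current_cmd:
--                 segments.append(CommandSegment(current_cmd, last_op))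
--                 current_cmd = []
--             last_op = token
--         else:
--             current_cmd.append(token)
--
--     if current_cmd:
--         segments.append(CommandSegment(current_cmd, last_op))
--
--     return segments
-- ===== SOURCE B (Python) =====
-- from itertools import groupby
-- from typing import List, NamedTuple, Optional
--
-- class CommandSegment(NamedTuple):
--     cmd: List[str]
--     operator_before: Optional[str]
--
-- def _parse(tokens: List[str]) -> List[CommandSegment]:
--     segments = []
--     last_op = None
--     for is_op, run in groupby(tokens, key=lambda t: t in ("&&", "||")):
--         run = list(run)
--         if is_op:
--             last_op = run[-1]
--         else:
--             segments.append(CommandSegment(run, last_op))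
--     return segments
-- ===== Notes on version B (the rewrite author's own statement) =====
-- stated objective: idiomatic
-- what changed: Iterates over itertools.groupby runs of operator/command tokens with a single last_op variable, instead of a per-token loop with a current_cmd accumulator and a post-loop flush.
import Mathlib
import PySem

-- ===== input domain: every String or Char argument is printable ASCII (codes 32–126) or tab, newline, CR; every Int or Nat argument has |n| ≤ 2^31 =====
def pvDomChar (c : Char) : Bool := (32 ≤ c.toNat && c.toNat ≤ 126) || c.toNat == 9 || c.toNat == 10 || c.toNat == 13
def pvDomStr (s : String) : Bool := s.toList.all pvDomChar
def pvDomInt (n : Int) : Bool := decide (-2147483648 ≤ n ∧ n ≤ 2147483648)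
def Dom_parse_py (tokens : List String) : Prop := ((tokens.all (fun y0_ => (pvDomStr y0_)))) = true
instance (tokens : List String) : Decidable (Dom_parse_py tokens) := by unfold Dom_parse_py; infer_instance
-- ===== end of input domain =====

-- B groups the tokens into operator/command runs (itertools.groupby) and keeps one last_op
-- variable, instead of A's per-token loop with a current_cmd accumulator and post-loop flush.

-- ===== PORT A =====
-- token in ("&&", "||")
def pvIsOp (t : String) : Bool := t == "&&" || t == "||"

-- the body of A's for-loop; state = (segments, current_cmd, last_op)
def pvStepA (s : List (List String × Option String) × List String × Option String)
    (token : String) : List (List String × Option String) × List String × Option String :=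
  if pvIsOp token then
    (if s.2.1 ≠ [] then s.1 ++ [(s.2.1, s.2.2)] else s.1, [], some token)
  else
    (s.1, s.2.1 ++ [token], s.2.2)

def parse_py (tokens : List String) : List (List String × Option String) :=
  let st := tokens.foldl pvStepA ([], [], none)
  if st.2.1 ≠ [] then st.1 ++ [(st.2.1, st.2.2)] else st.1

-- ===== PORT B =====
-- itertools.groupby(tokens, key=pvIsOp): maximal runs of equal key, in order
def pvRunsBy (tokens : List String) : List (Bool × List String) :=
  match tokens with
  | [] => []
  | t :: rest =>
      (pvIsOp t, t :: rest.takeWhile (fun x => pvIsOp x == pvIsOp t))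
        :: pvRunsBy (rest.dropWhile (fun x => pvIsOp x == pvIsOp t))
termination_by tokens.length
decreasing_by
  simpa using Nat.lt_succ_of_le (List.length_dropWhile_le _ _)

-- the body of B's for-loop; state = (segments, last_op); run[-1] via getLastD
def pvStepB (s : List (List String × Option String) × Option String)
    (r : Bool × List String) : List (List String × Option String) × Option String :=
  if r.1 then (s.1, some (r.2.getLastD "")) else (s.1 ++ [(r.2, s.2)], s.2)

def parse_py_alt (tokens : List String) : List (List String × Option String) :=
  ((pvRunsBy tokens).foldl pvStepB ([], none)).1

-- ===== PRECONDITION & SPEC =====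
def Spec_parse_py (tokens : List String) (out : List (List String × Option String)) : Prop := out = parse_py_alt tokens
instance (tokens : List String) (out : List (List String × Option String)) : Decidable (Spec_parse_py tokens out) := by unfold Spec_parse_py; infer_instance

-- ===== CLAIM (what is proved, stated in full; the proofs are below) =====
def Claim_equal_parse_py : Prop := ∀ (tokens : List String), Dom_parse_py tokens → Spec_parse_py tokens (parse_py tokens)

-- ===== LEMMAS AND PROOFS =====

-- A's post-loop flush
def pvFinishA (s : List (List String × Option String) × List String × Option String) :
    List (List String × Option String) :=
  if s.2.1 ≠ [] then s.1 ++ [(s.2.1, s.2.2)] else s.1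

theorem pvFoldOps (l : List String) (h : ∀ x ∈ l, pvIsOp x = true)
    (S : List (List String × Option String)) (o : String) :
    List.foldl pvStepA (S, [], some o) l = (S, [], some (l.getLastD o)) := by
  induction l generalizing o with
  | nil => simp
  | cons a l ih =>
      have ha := h a (by simp)
      simp only [List.foldl_cons, pvStepA, ha, if_pos, List.getLastD_cons]
      simpa using ih (fun x hx => h x (by simp [hx])) a

theorem pvFoldCmds (l : List String) (h : ∀ x ∈ l, pvIsOp x = false)
    (S : List (List String × Option String)) (c : List String) (o : Option String) :
    List.foldl pvStepA (S, c, o) l = (S, c ++ l, o) := by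
  induction l generalizing c with
  | nil => simp
  | cons a l ih =>
      have ha := h a (by simp)
      simp only [List.foldl_cons, pvStepA, ha]
      simpa using ih (fun x hx => h x (by simp [hx])) (c ++ [a])

theorem pvMem_takeWhile {p : String → Bool} {l : List String} {x : String}
    (hx : x ∈ l.takeWhile p) : p x = true :=
  List.mem_takeWhile_imp hx

theorem pvGetLastD (l : List String) (u : String) :
    (u :: l).getLast?.getD "" = l.getLast?.getD u := by
  rw [← List.getLastD_eq_getLast?, ← List.getLastD_eq_getLast?, List.getLastD_cons]

theorem pvMain (n : Nat) : ∀ (tokens : List String), tokens.length ≤ n →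
    ∀ (S : List (List String × Option String)) (o : Option String),
    pvFinishA (List.foldl pvStepA (S, [], o) tokens)
      = ((pvRunsBy tokens).foldl pvStepB (S, o)).1 := by
  induction n with
  | zero =>
      intro tokens h S o
      have : tokens = [] := List.eq_nil_of_length_eq_zero (Nat.le_zero.mp h)
      subst this; simp [pvRunsBy, pvFinishA]
  | succ n ih =>
      intro tokens h S o
      match tokens with
      | [] => simp [pvRunsBy, pvFinishA]
      | t :: rest =>
        have hrest : rest.length ≤ n := Nat.le_of_succ_le_succ h
        by_cases hop : pvIsOp t = true
        · -- operator run
          rw [pvRunsBy]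
          set take := rest.takeWhile (fun x => pvIsOp x == pvIsOp t) with htake
          set drop := rest.dropWhile (fun x => pvIsOp x == pvIsOp t) with hdrop
          have hsplit : rest = take ++ drop := (List.takeWhile_append_dropWhile).symm
          have htakeops : ∀ x ∈ take, pvIsOp x = true := by
            intro x hx
            have := pvMem_takeWhile hx
            simpa [hop] using this
          have hdlen : drop.length ≤ n :=
            le_trans (List.length_dropWhile_le _ _) hrest
          have hstep : pvStepA (S, [], o) t = (S, [], some t) := by
            simp [pvStepA, hop]
          rw [List.foldl_cons, hstep, hsplit, List.foldl_append,
              pvFoldOps take htakeops S t, ih drop hdlen]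
          simp [pvStepB, hop, pvGetLastD]
        · -- command run
          rw [pvRunsBy]
          set take := rest.takeWhile (fun x => pvIsOp x == pvIsOp t) with htake
          set drop := rest.dropWhile (fun x => pvIsOp x == pvIsOp t) with hdrop
          have hsplit : rest = take ++ drop := (List.takeWhile_append_dropWhile).symm
          have htakecmd : ∀ x ∈ take, pvIsOp x = false := by
            intro x hx
            have := pvMem_takeWhile hx
            simp only [Bool.not_eq_true] at hop
            simpa [hop] using this
          have hdlen : drop.length ≤ n :=
            le_trans (List.length_dropWhile_le _ _) hrest
          have hstep : pvStepA (S, [], o) t = (S, [t], o) := by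
            simp [pvStepA, hop]
          rw [List.foldl_cons, hstep, hsplit, List.foldl_append,
              pvFoldCmds take htakecmd S [t] o]
          match hd : drop with
          | [] =>
              simp [pvRunsBy, pvFinishA, pvStepB, hop]
          | u :: tail =>
              -- head of dropWhile fails the predicate, so u is an operator
              have hu : pvIsOp u = true := by
                have := List.head_dropWhile_not (fun x => pvIsOp x == pvIsOp t)
                  (l := rest) (by rw [← hdrop]; simp)
                simp only [← hdrop, List.head_cons] at this
                simp only [Bool.not_eq_true] at hop
                simpa [hop] using this
              rw [pvRunsBy]
              set take2 := tail.takeWhile (fun x => pvIsOp x == pvIsOp u) with htake2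
              set drop2 := tail.dropWhile (fun x => pvIsOp x == pvIsOp u) with hdrop2
              have hsplit2 : tail = take2 ++ drop2 := (List.takeWhile_append_dropWhile).symm
              have htake2ops : ∀ x ∈ take2, pvIsOp x = true := by
                intro x hx
                have := pvMem_takeWhile hx
                simpa [hu] using this
              have hd2len : drop2.length ≤ n := by
                have h1 : drop2.length ≤ tail.length := List.length_dropWhile_le _ _
                have h2 : (u :: tail).length ≤ rest.length := by
                  have := List.length_dropWhile_le (fun x => pvIsOp x == pvIsOp t) rest
                  rw [← hdrop] at this
                  exact this
                have := le_trans h1 (Nat.le_of_succ_le h2)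
                exact le_trans this hrest
              have hstep2 : pvStepA (S, [t] ++ take, o) u
                  = (S ++ [(t :: take, o)], [], some u) := by
                simp [pvStepA, hu]
              rw [List.foldl_cons, hstep2, hsplit2, List.foldl_append,
                  pvFoldOps take2 htake2ops _ u, ih drop2 hd2len]
              simp [pvStepB, hop, hu, pvGetLastD]

-- ===== VERDICT (by name: the statement is the Claim_ definition above) =====
theorem parse_py_spec : Claim_equal_parse_py := by
  intro tokens _
  show parse_py tokens = parse_py_alt tokens
  have := pvMain tokens.length tokens (le_refl _) [] none
  simpa [parse_py, parse_py_alt, pvFinishA] using this
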